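-- pv_equiv track=rewrite | github.com/OllieOA/advent_of_code_2023 | days/day11/solve_day.py | __get_offsets
-- ===== SOURCE A (Python) =====
-- from typing import List, Tuple
--
-- def __get_offsets(
--     point1: Tuple[int], point2: Tuple[int], expand_cols: List[int], expand_rows: List[int]
-- ) -> Tuple[int]:
--     """Here we need to count the number of offsets between two points after
--     they have been identified in . This
--     """
--     horiz_offsets = 0
--     for col in expand_cols:
--         if min(point1[1], point2[1]) <= col <= max(point1[1], point2[1]):
--             horiz_offsets += 1
--
--     vert_offsets = 0
--     for row in expand_rows:
--         if min(point1[0], point2[0]) <= row <= max(point1[0], point2[0]):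
--             vert_offsets += 1
--
--     return horiz_offsets, vert_offsets
-- ===== SOURCE B (Python) =====
-- def __get_offsets(point1, point2, expand_cols, expand_rows):
--     def _bisect_left(s, x):
--         lo, hi = 0, len(s)
--         while lo < hi:
--             mid = (lo + hi) // 2
--             if s[mid] < x:
--                 lo = mid + 1
--             else:
--                 hi = mid
--         return lo
--
--     def _bisect_right(s, x):
--         lo, hi = 0, len(s)
--         while lo < hi:
--             mid = (lo + hi) // 2
--             if x < s[mid]:
--                 hi = mid
--             else:
--                 lo = mid + 1
--         return lo
--
--     def _count_in(vals, a, b):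
--         lo, hi = (a, b) if a <= b else (b, a)
--         s = sorted(vals)
--         return _bisect_right(s, hi) - _bisect_left(s, lo)
--
--     return (
--         _count_in(expand_cols, point1[1], point2[1]),
--         _count_in(expand_rows, point1[0], point2[0]),
--     )
-- ===== Notes on version B (the rewrite author's own statement) =====
-- stated objective: alternative
-- what changed: Replaces A's per-element interval-membership counting loops by sort-then-binary-search: each count is obtained as bisect_right(hi) - bisect_left(lo) on a sorted copy of the expansion list.
-- outside the precondition, e.g. on __get_offsets((), (), [], []): A returns (0, 0), B raises IndexError
import Mathlib
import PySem

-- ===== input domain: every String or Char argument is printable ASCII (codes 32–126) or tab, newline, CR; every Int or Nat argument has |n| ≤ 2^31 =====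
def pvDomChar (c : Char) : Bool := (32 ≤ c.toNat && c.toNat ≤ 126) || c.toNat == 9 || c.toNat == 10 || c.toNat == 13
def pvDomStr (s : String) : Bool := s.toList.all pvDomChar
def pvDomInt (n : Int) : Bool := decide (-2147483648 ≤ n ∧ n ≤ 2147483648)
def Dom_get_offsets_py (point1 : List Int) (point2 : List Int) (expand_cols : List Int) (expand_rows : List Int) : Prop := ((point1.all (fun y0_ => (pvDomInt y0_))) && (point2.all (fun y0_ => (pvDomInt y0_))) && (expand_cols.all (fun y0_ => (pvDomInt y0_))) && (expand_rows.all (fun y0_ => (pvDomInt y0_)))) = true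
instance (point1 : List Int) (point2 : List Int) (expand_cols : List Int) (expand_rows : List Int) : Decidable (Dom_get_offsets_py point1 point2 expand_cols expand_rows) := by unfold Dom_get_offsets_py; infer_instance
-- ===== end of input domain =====

-- B replaces A's linear membership-counting loops by sort-then-binary-search (bisect_right - bisect_left); alternative structure, not claimed faster.

-- ===== PORT A =====
-- indices 0 and 1 of point1/point2 are in range by Pre_; pyGetD's default is never read there
def get_offsets_py (point1 : List Int) (point2 : List Int) (expand_cols : List Int) (expand_rows : List Int) : List Int :=
  let horiz_offsets : Int := expand_cols.foldl (fun acc col =>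
    if min (PySem.List.pyGetD point1 1 0) (PySem.List.pyGetD point2 1 0) ≤ col ∧
       col ≤ max (PySem.List.pyGetD point1 1 0) (PySem.List.pyGetD point2 1 0) then acc + 1 else acc) 0
  let vert_offsets : Int := expand_rows.foldl (fun acc row =>
    if min (PySem.List.pyGetD point1 0 0) (PySem.List.pyGetD point2 0 0) ≤ row ∧
       row ≤ max (PySem.List.pyGetD point1 0 0) (PySem.List.pyGetD point2 0 0) then acc + 1 else acc) 0
  [horiz_offsets, vert_offsets]

-- ===== PORT B =====
-- Source B's hand-written _bisect_left/_bisect_right are exactly Python's bisect_left/bisect_right,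
-- ported as the prelude's PySem.List.bisectLeft / bisectRight; sorted(vals) is PySem.List.sorted.
def pvCountIn (vals : List Int) (a b : Int) : Int :=
  let lo : Int := if a ≤ b then a else b
  let hi : Int := if a ≤ b then b else a
  let s := PySem.List.sorted vals (fun v => v) false
  ((PySem.List.bisectRight s hi : Int) - (PySem.List.bisectLeft s lo : Int))

def get_offsets_py_alt (point1 : List Int) (point2 : List Int) (expand_cols : List Int) (expand_rows : List Int) : List Int :=
  [pvCountIn expand_cols (PySem.List.pyGetD point1 1 0) (PySem.List.pyGetD point2 1 0),
   pvCountIn expand_rows (PySem.List.pyGetD point1 0 0) (PySem.List.pyGetD point2 0 0)]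

-- ===== PRECONDITION & SPEC =====
-- Pre_ excludes point tuples with fewer than 2 coordinates: A raises IndexError there whenever an expansion list is non-empty, and when both lists are empty A's (0,0) is an accident of indexing inside the loop; B (which indexes the points up front) raises on all of them.
def Pre_get_offsets_py (point1 : List Int) (point2 : List Int) (expand_cols : List Int) (expand_rows : List Int) : Prop :=
  2 ≤ point1.length ∧ 2 ≤ point2.length
instance (point1 : List Int) (point2 : List Int) (expand_cols : List Int) (expand_rows : List Int) : Decidable (Pre_get_offsets_py point1 point2 expand_cols expand_rows) := by unfold Pre_get_offsets_py; infer_instance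

def pvWitness_get_offsets_py : List Int × List Int × List Int × List Int := ([0, 1], [3, 4], [2, 5], [1])

def Spec_get_offsets_py (point1 : List Int) (point2 : List Int) (expand_cols : List Int) (expand_rows : List Int) (out : List Int) : Prop := out = get_offsets_py_alt point1 point2 expand_cols expand_rows
instance (point1 : List Int) (point2 : List Int) (expand_cols : List Int) (expand_rows : List Int) (out : List Int) : Decidable (Spec_get_offsets_py point1 point2 expand_cols expand_rows out) := by unfold Spec_get_offsets_py; infer_instance

-- ===== CLAIM (what is proved, stated in full; the proofs are below) =====
def Claim_equal_get_offsets_py : Prop := ∀ (point1 : List Int) (point2 : List Int) (expand_cols : List Int) (expand_rows : List Int), Dom_get_offsets_py point1 point2 expand_cols expand_rows → Pre_get_offsets_py point1 point2 expand_cols expand_rows → Spec_get_offsets_py point1 point2 expand_cols expand_rows (get_offsets_py point1 point2 expand_cols expand_rows)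

-- ===== LEMMAS AND PROOFS =====

-- a predicate true exactly on the first k positions counts to k
theorem pvCountP_eq_of_index_iff (s : List Int) (p : Int → Bool) (k : Nat)
    (h : ∀ j (hj : j < s.length), p s[j] = true ↔ j < k) (hk : k ≤ s.length) :
    s.countP p = k := by
  induction s generalizing k with
  | nil => simp only [List.countP_nil]; simp at hk; omega
  | cons a t ih =>
    cases k with
    | zero =>
      have ha : p a = false := by
        have := h 0 (by simp)
        simp at this; simpa using this
      have ht : t.countP p = 0 := by
        apply ih 0
        · intro j hj
          have := h (j + 1) (by simpa using Nat.succ_lt_succ hj)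
          simpa using this
        · omega
      simp [ha, ht]
    | succ k' =>
      have ha : p a = true := by
        have := h 0 (by simp)
        simpa using this.mpr (Nat.succ_pos _)
      have ht : t.countP p = k' := by
        apply ih k'
        · intro j hj
          have := h (j + 1) (by simpa using Nat.succ_lt_succ hj)
          simpa [Nat.succ_lt_succ_iff] using this
        · simpa using hk
      simp [ha, ht]

theorem pvBisectLeft_eq_countP (s : List Int) (x : Int)
    (hs : s.Pairwise (· ≤ ·)) :
    PySem.List.bisectLeft s x = s.countP (fun v => decide (v < x)) := by
  obtain ⟨hle, hlt, hge⟩ := PySem.List.bisectLeft_spec s x hs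
  refine (pvCountP_eq_of_index_iff s _ _ ?_ hle).symm
  intro j hj
  simp only [decide_eq_true_eq]
  constructor
  · intro hp
    by_contra hc
    exact absurd (hge j hj (by omega)) (by omega)
  · exact hlt j hj

theorem pvBisectRight_eq_countP (s : List Int) (x : Int)
    (hs : s.Pairwise (· ≤ ·)) :
    PySem.List.bisectRight s x = s.countP (fun v => decide (v ≤ x)) := by
  obtain ⟨hle, hlt, hge⟩ := PySem.List.bisectRight_spec s x hs
  refine (pvCountP_eq_of_index_iff s _ _ ?_ hle).symm
  intro j hj
  simp only [decide_eq_true_eq]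
  constructor
  · intro hp
    by_contra hc
    exact absurd (hge j hj (by omega)) (by omega)
  · exact hlt j hj

theorem pvCount_split (s : List Int) (lo hi : Int) (h : lo ≤ hi) :
    s.countP (fun v => decide (v ≤ hi)) =
      s.countP (fun v => decide (v < lo)) + s.countP (fun v => decide (lo ≤ v ∧ v ≤ hi)) := by
  induction s with
  | nil => simp
  | cons a t ih =>
    simp only [List.countP_cons, decide_eq_true_eq, ih]
    split_ifs <;> omega

-- A's counting loop over vals equals B's sort-and-bisect count
theorem pvLoop_eq_countIn (vals : List Int) (a b : Int) :
    vals.foldl (fun acc v => if min a b ≤ v ∧ v ≤ max a b then acc + 1 else acc) (0 : Int)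
      = pvCountIn vals a b := by
  rw [PySem.List.foldl_ite_add_one]
  unfold pvCountIn
  rw [← min_def, ← max_def]
  set s := PySem.List.sorted vals (fun v => v) false with hsdef
  show _ = ((PySem.List.bisectRight s (max a b) : Int) - (PySem.List.bisectLeft s (min a b) : Int))
  have hp : s.Pairwise (· ≤ ·) := by
    have := PySem.List.sorted_pairwise vals (fun v => v)
    simpa using this
  rw [pvBisectLeft_eq_countP s (min a b) hp, pvBisectRight_eq_countP s (max a b) hp]
  have hperm : s.Perm vals := PySem.List.sorted_perm vals (fun v => v) false
  have hsplit := pvCount_split s (min a b) (max a b) (min_le_max)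
  have hcp : s.countP (fun v => decide (min a b ≤ v ∧ v ≤ max a b))
      = vals.countP (fun v => decide (min a b ≤ v ∧ v ≤ max a b)) := hperm.countP_eq _
  omega

-- ===== VERDICT (by name: the statement is the Claim_ definition above) =====
theorem get_offsets_py_spec : Claim_equal_get_offsets_py := by
  intro point1 point2 expand_cols expand_rows _ _
  unfold Spec_get_offsets_py get_offsets_py get_offsets_py_alt
  rw [pvLoop_eq_countIn, pvLoop_eq_countIn]
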